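-- pv_equiv track=rewrite | github.com/Alpha0117/Sorting-Methods | sorting_algorithms.py | polyphase_merge_sort
-- ===== SOURCE A (Python) =====
-- def polyphase_merge_sort(arr):
--     steps = []
--     def merge(a, b, left, right):
--         i = left
--         j = right
--         merged = []
--         while i < len(a) and j < len(b):
--             if a[i] < b[j]:
--                 merged.append(a[i])
--                 i += 1
--             else:
--                 merged.append(b[j])
--                 j += 1
--         merged += a[i:]
--         merged += b[j:]
--         return merged
--
--     def merge_pass(arr):
--         n = len(arr)
--         merged = []
--         i = 0
--         while i < n:
--             if i + 1 < n:
--                 merged += merge(arr[i], arr[i + 1], 0, 0)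
--                 i += 2
--             else:
--                 merged += arr[i]
--                 i += 1
--         return merged
--
--     n = len(arr)
--     k = 1
--     while k < n:
--         groups = [arr[i:i + k] for i in range(0, n, k)]
--         arr = merge_pass(groups)
--         steps.append(list(arr))
--         k *= 2
--     return arr, steps
-- ===== SOURCE B (Python) =====
-- def polyphase_merge_sort(arr):
--     # Each pass snapshot of bottom-up merge sort over ints is just the input
--     # partitioned into aligned chunks of width 2k, each chunk sorted; compute
--     # every snapshot independently by sorting chunks of the ORIGINAL array.
--     n = len(arr)
--     steps = []
--     k = 1
--     while k < n:
--         k *= 2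
--         steps.append([x for i in range(0, n, k) for x in sorted(arr[i:i + k])])
--     return (steps[-1] if steps else arr), steps
-- ===== Notes on version B (the rewrite author's own statement) =====
-- stated objective: alternative
-- what changed: B performs no merging at all: since a merge pass over int chunks leaves each aligned width-2k chunk equal to that chunk of the original array sorted, B computes every pass snapshot independently by slicing the ORIGINAL array into width-2k chunks and sorting each with the built-in sorted(), returning the last snapshot (or the input when n<=1).
import Mathlib
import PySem

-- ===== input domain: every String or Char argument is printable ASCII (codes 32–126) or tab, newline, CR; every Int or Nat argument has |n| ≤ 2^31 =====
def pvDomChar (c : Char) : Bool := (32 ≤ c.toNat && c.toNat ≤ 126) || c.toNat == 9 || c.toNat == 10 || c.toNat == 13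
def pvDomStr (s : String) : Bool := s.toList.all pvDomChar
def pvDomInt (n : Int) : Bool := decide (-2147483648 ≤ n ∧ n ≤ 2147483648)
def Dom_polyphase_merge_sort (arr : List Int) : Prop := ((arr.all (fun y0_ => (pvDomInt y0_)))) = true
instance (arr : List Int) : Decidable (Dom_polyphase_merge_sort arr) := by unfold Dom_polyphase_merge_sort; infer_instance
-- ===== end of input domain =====

-- B does no merging: it computes each pass snapshot independently by sorting the
-- aligned width-2k chunks of the ORIGINAL array with the library sort (objective: alternative).
-- Neither program mutates its argument.

-- ===== PORT A =====
-- inner `merge(a, b, left, right)` (always called with left = right = 0):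
-- while i < len(a) and j < len(b) take the smaller element (ties take b), then flush a[i:] ++ b[j:]
def mergeA (a b : List Int) (i j : Nat) : List Int :=
  if h : i < a.length ∧ j < b.length then
    if a[i] < b[j] then a[i] :: mergeA a b (i + 1) j
    else b[j] :: mergeA a b i (j + 1)
  else a.drop i ++ b.drop j
termination_by (a.length - i) + (b.length - j)
decreasing_by
  · exact Nat.add_lt_add_right (Nat.sub_succ_lt_self _ _ h.1) _
  · exact Nat.add_lt_add_left (Nat.sub_succ_lt_self _ _ h.2) _

-- `merge_pass(arr)`: while i < n merge groups i, i+1 (or flush a lone last group)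
def mergePassA : List (List Int) → List Int
  | [] => []
  | [g] => g
  | g1 :: g2 :: rest => mergeA g1 g2 0 0 ++ mergePassA rest

-- `[arr[i:i + k] for i in range(0, n, k)]`: a slice arr[i:i+k] at natural bounds is
-- (arr.drop i).take k, so stepping i by k is this recursion (k = 0 never occurs: k ≥ 1)
def chunksA (l : List Int) (k : Nat) : List (List Int) :=
  if _h : l = [] ∨ k = 0 then [] else l.take k :: chunksA (l.drop k) k
termination_by l.length
decreasing_by
  rw [List.length_drop]
  exact Nat.sub_lt (List.length_pos_of_ne_nil fun e => _h (Or.inl e))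
    (Nat.pos_of_ne_zero fun e => _h (Or.inr e))

-- `while k < n: arr = merge_pass(groups); steps.append(list(arr)); k *= 2`
-- (the 0 < k conjunct only makes the doubling loop total; the loop runs with k ≥ 1)
def loopA (arr : List Int) (n k : Nat) (steps : List (List Int)) :
    List Int × List (List Int) :=
  if _h : 0 < k ∧ k < n then
    let arr' := mergePassA (chunksA arr k)
    loopA arr' n (2 * k) (steps ++ [arr'])
  else (arr, steps)
termination_by n - k
decreasing_by exact Nat.sub_lt_sub_left _h.2 ((Nat.lt_add_of_pos_left (n := k) (k := k) _h.1 : k < k + k).trans_eq (Nat.two_mul k).symm)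

def polyphase_merge_sort (arr : List Int) : List Int × List (List Int) :=
  loopA arr arr.length 1 []

-- ===== PORT B =====
-- `[x for i in range(0, n, k) for x in sorted(arr[i:i+k])]`: one snapshot — sort each
-- width-k chunk of the original array (k = 0 never occurs: k ≥ 2 at every call)
def snapB (l : List Int) (k : Nat) : List Int :=
  if _h : l = [] ∨ k = 0 then []
  else PySem.List.sorted (l.take k) (fun x => x) false ++ snapB (l.drop k) k
termination_by l.length
decreasing_by
  rw [List.length_drop]
  exact Nat.sub_lt (List.length_pos_of_ne_nil fun e => _h (Or.inl e))
    (Nat.pos_of_ne_zero fun e => _h (Or.inr e))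

-- `while k < n: k *= 2; steps.append(<snapshot of width k>)`
def loopB (arr : List Int) (n k : Nat) (steps : List (List Int)) : List (List Int) :=
  if _h : 0 < k ∧ k < n then
    loopB arr n (2 * k) (steps ++ [snapB arr (2 * k)])
  else steps
termination_by n - k
decreasing_by exact Nat.sub_lt_sub_left _h.2 ((Nat.lt_add_of_pos_left (n := k) (k := k) _h.1 : k < k + k).trans_eq (Nat.two_mul k).symm)

-- `return (steps[-1] if steps else arr), steps`
def polyphase_merge_sort_alt (arr : List Int) : List Int × List (List Int) :=
  let steps := loopB arr arr.length 1 []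
  (steps.getLast?.getD arr, steps)

-- ===== PRECONDITION & SPEC =====
def Spec_polyphase_merge_sort (arr : List Int) (out : List Int × List (List Int)) : Prop := out = polyphase_merge_sort_alt arr
instance (arr : List Int) (out : List Int × List (List Int)) : Decidable (Spec_polyphase_merge_sort arr out) := by unfold Spec_polyphase_merge_sort; infer_instance

-- ===== CLAIM (what is proved, stated in full; the proofs are below) =====
def Claim_equal_polyphase_merge_sort : Prop := ∀ (arr : List Int), Dom_polyphase_merge_sort arr → Spec_polyphase_merge_sort arr (polyphase_merge_sort arr)

-- ===== LEMMAS AND PROOFS =====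

-- proof-side reference merge: consume the smaller head (ties from the right list)
def mergeB : List Int → List Int → List Int
  | [], r => r
  | x :: l, [] => x :: l
  | x :: l, y :: r => if x < y then x :: mergeB l (y :: r) else y :: mergeB (x :: l) r

theorem mergeB_nil_right (l : List Int) : mergeB l [] = l := by
  cases l <;> simp [mergeB]

theorem mergeB_perm (l r : List Int) : (mergeB l r).Perm (l ++ r) := by
  fun_induction mergeB l r with
  | case1 r => simp
  | case2 x l => simp
  | case3 x l y r hlt ih => simpa using ih.cons x
  | case4 x l y r hlt ih =>
      exact (ih.cons y).trans ((List.perm_middle (a := y) (l₁ := x :: l) (l₂ := r)).symm)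

theorem mergeB_pairwise (l r : List Int) (hl : l.Pairwise (· ≤ ·)) (hr : r.Pairwise (· ≤ ·)) :
    (mergeB l r).Pairwise (· ≤ ·) := by
  fun_induction mergeB l r with
  | case1 r => exact hr
  | case2 x l => exact hl
  | case3 x l y r hlt ih =>
      rw [List.pairwise_cons] at hl ⊢
      refine ⟨fun z hz => ?_, ih hl.2 hr⟩
      have : z ∈ l ++ (y :: r) := (mergeB_perm l (y :: r)).subset hz
      rcases List.mem_append.1 this with h | h
      · exact hl.1 z h
      · rcases List.mem_cons.1 h with h | h
        · exact h ▸ le_of_lt hlt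
        · exact le_of_lt (lt_of_lt_of_le hlt ((List.pairwise_cons.1 hr).1 z h))
  | case4 x l y r hlt ih =>
      rw [List.pairwise_cons] at hr ⊢
      refine ⟨fun z hz => ?_, ih hl hr.2⟩
      have : z ∈ (x :: l) ++ r := (mergeB_perm (x :: l) r).subset hz
      have hyx : y ≤ x := le_of_not_gt hlt
      rcases List.mem_append.1 this with h | h
      · rcases List.mem_cons.1 h with h | h
        · exact h ▸ hyx
        · exact hyx.trans ((List.pairwise_cons.1 hl).1 z h)
      · exact hr.1 z h

-- merging the sorted halves IS sorting the whole (ints: equal elements are identical)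
theorem mergeB_sorted_append (a b : List Int) :
    mergeB (PySem.List.sorted a (fun x => x) false) (PySem.List.sorted b (fun x => x) false)
      = PySem.List.sorted (a ++ b) (fun x => x) false := by
  have hperm : (mergeB (PySem.List.sorted a (fun x => x) false)
      (PySem.List.sorted b (fun x => x) false)).Perm (a ++ b) :=
    (mergeB_perm _ _).trans ((PySem.List.sorted_perm a (fun x => x) false).append
      (PySem.List.sorted_perm b (fun x => x) false))
  have hpw := mergeB_pairwise _ _
    (PySem.List.sorted_pairwise a (fun x => x)) (PySem.List.sorted_pairwise b (fun x => x))
  exact (PySem.List.sorted_id_eq_of_perm_of_pairwise (a ++ b) _ hperm hpw).symm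

-- A's cursor merge on suffixes is the reference merge
theorem mergeA_eq (a b : List Int) (i j : Nat) :
    mergeA a b i j = mergeB (a.drop i) (b.drop j) := by
  fun_induction mergeA a b i j with
  | case1 i j h hlt ih =>
      rw [List.drop_eq_getElem_cons h.1, List.drop_eq_getElem_cons h.2, mergeB,
        if_pos hlt, ih, List.drop_eq_getElem_cons h.2]
  | case2 i j h hlt ih =>
      rw [List.drop_eq_getElem_cons h.1, List.drop_eq_getElem_cons h.2, mergeB,
        if_neg hlt, ih, List.drop_eq_getElem_cons h.1]
  | case3 i j h =>
      rcases Nat.lt_or_ge i a.length with hi | hi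
      · have hj : b.length ≤ j := by omega
        rw [List.drop_eq_nil_of_le hj, mergeB_nil_right, List.append_nil]
      · rw [List.drop_eq_nil_of_le hi]
        cases hd : b.drop j <;> simp [mergeB]

-- shorthand for the proofs below
def sortI (l : List Int) : List Int := PySem.List.sorted l (fun x => x) false

theorem sortI_length (l : List Int) : (sortI l).length = l.length :=
  (PySem.List.sorted_perm l (fun x => x) false).length_eq

theorem sortI_ne_nil {l : List Int} (h : l ≠ []) : sortI l ≠ [] := by
  intro e
  exact h ((PySem.List.sorted_eq_nil_iff (xs := l) (key := fun x => x) (rev := false)).1 e)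

theorem snapB_nil (k : Nat) : snapB [] k = [] := by simp [snapB]

-- snapshot of a short list (length ≤ k) is just its sort
theorem snapB_short {l : List Int} {k : Nat} (hk : 0 < k) (h : l.length ≤ k) :
    snapB l k = sortI l := by
  by_cases hnil : l = []
  · subst hnil
    simp [snapB, sortI, PySem.List.sorted]
  · rw [snapB, dif_neg (by simpa [hnil] using hk.ne'), List.take_of_length_le h,
      List.drop_eq_nil_of_le h, snapB_nil, List.append_nil, sortI]

-- one merge pass over the width-k snapshot is the width-2k snapshot of the original
theorem pass_snap (k : Nat) (hk : 0 < k) :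
    ∀ (l : List Int), mergePassA (chunksA (snapB l k) k) = snapB l (2 * k) := by
  suffices H : ∀ (m : Nat) (l : List Int), l.length ≤ m →
      mergePassA (chunksA (snapB l k) k) = snapB l (2 * k) by
    exact fun l => H l.length l le_rfl
  intro m
  induction m with
  | zero =>
      intro l hl
      have : l = [] := by cases l <;> simp_all
      subst this
      simp [snapB, chunksA, mergePassA]
  | succ m ih =>
      intro l hl
      by_cases hnil : l = []
      · subst hnil
        simp [snapB, chunksA, mergePassA]
      · have hk2 : 0 < 2 * k := by omega
        have hlpos : 0 < l.length := List.length_pos_of_ne_nil hnil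
        by_cases hshort : l.length ≤ k
        · -- one chunk: the pass flushes the lone sorted group
          rw [snapB_short hk hshort,
            chunksA, dif_neg (by
              rintro (e | e)
              · exact sortI_ne_nil hnil e
              · omega),
            List.take_of_length_le (by rw [sortI_length]; exact hshort),
            List.drop_eq_nil_of_le (by rw [sortI_length]; exact hshort),
            chunksA, dif_pos (Or.inl rfl)]
          rw [snapB_short hk2 (by omega)]
          rfl
        · rw [Nat.not_le] at hshort
          have hs1 : (sortI (l.take k)).length = k := by
            rw [sortI_length, List.length_take]; omega
          have hsnap : snapB l k = sortI (l.take k) ++ snapB (l.drop k) k := by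
            rw [snapB, dif_neg (by simp [hnil, hk.ne'])]; rfl
          by_cases hd2 : l.length ≤ 2 * k
          · -- two chunks, second short: merge them, nothing left
            have hrest : snapB (l.drop k) k = sortI (l.drop k) := by
              exact snapB_short hk (by rw [List.length_drop]; omega)
            have hdrop_ne : l.drop k ≠ [] := by
              intro e; rw [List.drop_eq_nil_iff] at e; omega
            have hs2len : (sortI (l.drop k)).length ≤ k := by
              rw [sortI_length, List.length_drop]; omega
            have htk_ne : l.take k ≠ [] := by
              simpa [List.take_eq_nil_iff, hk.ne'] using hnil
            rw [hsnap, hrest,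
              chunksA, dif_neg (by
                rintro (e | e)
                · exact sortI_ne_nil htk_ne (List.append_eq_nil_iff.1 e).1
                · omega),
              List.take_left' hs1, List.drop_left' hs1,
              chunksA, dif_neg (by
                rintro (e | e)
                · exact sortI_ne_nil hdrop_ne e
                · omega),
              List.take_of_length_le hs2len, List.drop_eq_nil_of_le hs2len,
              chunksA, dif_pos (Or.inl rfl)]
            show mergeA (sortI (l.take k)) (sortI (l.drop k)) 0 0 ++ mergePassA [] = _
            rw [mergeA_eq, List.drop_zero, List.drop_zero]
            show mergeB (sortI (l.take k)) (sortI (l.drop k)) ++ [] = _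
            rw [List.append_nil, sortI, sortI, mergeB_sorted_append, List.take_append_drop,
              snapB_short hk2 hd2]
            rfl
          · -- at least two full chunks: merge the first two, recurse on the rest
            rw [Nat.not_le] at hd2
            have hd_ne : l.drop k ≠ [] := by
              intro e; rw [List.drop_eq_nil_iff] at e; omega
            have hs2 : (sortI ((l.drop k).take k)).length = k := by
              rw [sortI_length, List.length_take, List.length_drop]; omega
            have hsnap2 : snapB (l.drop k) k
                = sortI ((l.drop k).take k) ++ snapB ((l.drop k).drop k) k := by
              rw [snapB, dif_neg (by simp [hd_ne, hk.ne'])]; rfl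
            have htk_ne : l.take k ≠ [] := by simpa [List.take_eq_nil_iff, hk.ne'] using hnil
            have htk2_ne : (l.drop k).take k ≠ [] := by
              simpa [List.take_eq_nil_iff, hk.ne'] using hd_ne
            rw [hsnap, hsnap2,
              chunksA, dif_neg (by
                rintro (e | e)
                · exact sortI_ne_nil htk_ne (List.append_eq_nil_iff.1 e).1
                · omega),
              List.take_left' hs1, List.drop_left' hs1,
              chunksA, dif_neg (by
                rintro (e | e)
                · exact sortI_ne_nil htk2_ne (List.append_eq_nil_iff.1 e).1
                · omega),
              List.take_left' hs2, List.drop_left' hs2]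
            show mergeA (sortI (l.take k)) (sortI ((l.drop k).take k)) 0 0
                ++ mergePassA (chunksA (snapB ((l.drop k).drop k) k) k) = _
            rw [mergeA_eq, List.drop_zero, List.drop_zero, sortI, sortI,
              mergeB_sorted_append,
              ih ((l.drop k).drop k) (by simp only [List.length_drop]; omega),
              List.drop_drop]
            have hR : snapB l (2 * k)
                = sortI (l.take (2 * k)) ++ snapB (l.drop (2 * k)) (2 * k) := by
              rw [snapB, dif_neg (by
                rintro (e | e)
                · exact hnil e
                · omega)]
              rfl
            rw [hR, show 2 * k = k + k by ring, List.take_add]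
            rfl

-- steps accumulate on the right in A's loop
theorem loopA_acc (n : Nat) : ∀ (d k : Nat), d = n - k →
    ∀ (cur : List Int) (steps : List (List Int)),
      loopA cur n k steps = ((loopA cur n k []).1, steps ++ (loopA cur n k []).2) := by
  intro d
  induction d using Nat.strong_induction_on with
  | _ d ih =>
      intro k hd cur steps
      by_cases h : 0 < k ∧ k < n
      · conv_lhs => rw [loopA, dif_pos h]
        conv_rhs => rw [loopA, dif_pos h]
        simp only [List.nil_append]
        rw [ih (n - 2 * k) (by omega) (2 * k) rfl (mergePassA (chunksA cur k))
            (steps ++ [mergePassA (chunksA cur k)]),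
          ih (n - 2 * k) (by omega) (2 * k) rfl (mergePassA (chunksA cur k))
            [mergePassA (chunksA cur k)]]
        simp
      · conv_lhs => rw [loopA, dif_neg h]
        conv_rhs => rw [loopA, dif_neg h]
        simp

-- steps accumulate on the right in B's loop
theorem loopB_acc (orig : List Int) (n : Nat) : ∀ (d k : Nat), d = n - k →
    ∀ (steps : List (List Int)),
      loopB orig n k steps = steps ++ loopB orig n k [] := by
  intro d
  induction d using Nat.strong_induction_on with
  | _ d ih =>
      intro k hd steps
      by_cases h : 0 < k ∧ k < n
      · conv_lhs => rw [loopB, dif_pos h]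
        conv_rhs => rw [loopB, dif_pos h]
        simp only [List.nil_append]
        rw [ih (n - 2 * k) (by omega) (2 * k) rfl (steps ++ [snapB orig (2 * k)]),
          ih (n - 2 * k) (by omega) (2 * k) rfl [snapB orig (2 * k)]]
        simp
      · conv_lhs => rw [loopB, dif_neg h]
        conv_rhs => rw [loopB, dif_neg h]
        simp

-- the two loops agree: A's state entering width k is the width-k snapshot
theorem loop_main (orig : List Int) (n : Nat) : ∀ (d k : Nat), d = n - k → 0 < k →
    loopA (snapB orig k) n k []
      = ((loopB orig n k []).getLast?.getD (snapB orig k), loopB orig n k []) := by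
  intro d
  induction d using Nat.strong_induction_on with
  | _ d ih =>
      intro k hd hk
      by_cases h : k < n
      · have hk2 : 0 < 2 * k := by omega
        have hstep : mergePassA (chunksA (snapB orig k) k) = snapB orig (2 * k) :=
          pass_snap k hk orig
        conv_lhs => rw [loopA, dif_pos ⟨hk, h⟩]
        simp only [hstep, List.nil_append]
        rw [loopA_acc n (n - 2 * k) (2 * k) rfl (snapB orig (2 * k)) [snapB orig (2 * k)],
          ih (n - 2 * k) (by omega) (2 * k) rfl hk2]
        conv_rhs => rw [loopB, dif_pos ⟨hk, h⟩]
        rw [loopB_acc orig n (n - 2 * k) (2 * k) rfl ([] ++ [snapB orig (2 * k)])]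
        cases hLB : loopB orig n (2 * k) [] with
        | nil => simp
        | cons a t =>
            simp only [List.nil_append, List.cons_append]
            rw [List.getLast?_cons_cons]
            cases hlast : (a :: t).getLast? with
            | none => simp at hlast
            | some v => simp
      · conv_lhs => rw [loopA, dif_neg (by omega)]
        conv_rhs => rw [loopB, dif_neg (by omega)]
        simp

-- the width-1 snapshot is the list itself
theorem snapB_one (l : List Int) : snapB l 1 = l := by
  induction l with
  | nil => simp [snapB]
  | cons x t ih =>
      rw [snapB, dif_neg (by simp), show (x :: t).take 1 = [x] from rfl, show (x :: t).drop 1 = t from rfl, ih,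
        PySem.List.sorted_eq_self_of_pairwise [x] (fun y => y) (by simp)]
      rfl

-- ===== VERDICT (by name: the statement is the Claim_ definition above) =====
theorem polyphase_merge_sort_spec : Claim_equal_polyphase_merge_sort := by
  intro arr _
  unfold Spec_polyphase_merge_sort polyphase_merge_sort polyphase_merge_sort_alt
  have := loop_main arr arr.length (arr.length - 1) 1 rfl (by omega)
  rw [snapB_one] at this
  simpa using this
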